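-- pv_equiv track=rewrite | github.com/stackopshq/shark-cli | orca_cli/commands/server.py | _pick_ssh_ip
-- ===== SOURCE A (Python) =====
-- from typing import Any, Mapping
--
-- def _pick_ssh_ip(srv: Mapping[str, Any], prefer_fixed: bool = False) -> str | None:
--     """Pick the best IP. Floating wins unless prefer_fixed is set."""
--     floating = None
--     fixed = None
--     for _net, addrs in srv.get("addresses", {}).items():
--         for a in addrs:
--             if a.get("OS-EXT-IPS:type") == "floating":
--                 floating = floating or a.get("addr")
--             elif not fixed:
--                 fixed = a.get("addr")
--     if prefer_fixed:
--         return fixed or floating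
--     return floating or fixed
-- ===== SOURCE B (Python) =====
-- from typing import Any, Mapping
--
-- def _pick_ssh_ip(srv: Mapping[str, Any], prefer_fixed: bool = False) -> str | None:
--     """Pick the best IP. Floating wins unless prefer_fixed is set.
--
--     Rank-and-select: every usable (truthy-addr) address entry becomes a
--     candidate keyed by (priority, position) -- priority 0 for the preferred
--     address type, 1 for the other -- and the answer is the address of the
--     lexicographically minimal candidate; no candidates means None.
--     Never returns an empty-string address.
--     """
--     cands = []
--     i = 0
--     for addrs in srv.get("addresses", {}).values():
--         for a in addrs:
--             addr = a.get("addr")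
--             if addr:
--                 is_float = a.get("OS-EXT-IPS:type") == "floating"
--                 rank = 0 if is_float != prefer_fixed else 1
--                 cands.append((rank, i, addr))
--             i += 1
--     return min(cands)[2] if cands else None
-- ===== Notes on version B (the rewrite author's own statement) =====
-- stated objective: alternative
-- what changed: A's single accumulating pass with two mutable slots (floating/fixed, overwritten while falsy) is replaced by a rank-and-select algorithm: every truthy-addr entry becomes a candidate keyed by (priority of its address type, position), and the answer is the address of the lexicographically minimal candidate.
-- intended difference: When no address entry has a truthy 'addr' and the last entry of the category A falls back to (non-floating if prefer_fixed is false, floating if true, per A's slot logic) has 'addr' equal to the empty string, A returns '' (leftover falsy loop state) while B returns None, the intended answer since '' is not an IP address. — e.g. on _pick_ssh_ip([("addresses", [("net", [[("addr", "")]])])], false): A returns some "", B returns none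
import Mathlib
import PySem

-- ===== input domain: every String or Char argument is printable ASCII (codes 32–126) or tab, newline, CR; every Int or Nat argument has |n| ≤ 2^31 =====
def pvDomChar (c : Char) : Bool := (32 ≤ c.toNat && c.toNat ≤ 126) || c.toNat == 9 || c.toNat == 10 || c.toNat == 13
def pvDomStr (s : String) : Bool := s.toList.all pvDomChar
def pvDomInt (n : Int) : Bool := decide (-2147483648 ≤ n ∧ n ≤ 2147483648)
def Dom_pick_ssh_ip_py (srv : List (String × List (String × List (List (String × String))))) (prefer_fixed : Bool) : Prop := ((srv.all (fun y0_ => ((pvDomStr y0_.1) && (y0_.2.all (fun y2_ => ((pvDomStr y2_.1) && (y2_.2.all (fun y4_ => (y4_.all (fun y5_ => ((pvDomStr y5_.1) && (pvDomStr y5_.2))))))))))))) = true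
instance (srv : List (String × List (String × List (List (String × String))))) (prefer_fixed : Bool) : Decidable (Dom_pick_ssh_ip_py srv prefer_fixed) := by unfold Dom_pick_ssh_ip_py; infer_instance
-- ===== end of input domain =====

-- B replaces A's accumulating two-slot pass by rank-and-select: each truthy-addr entry
-- becomes a candidate keyed (type priority, position) and the lexicographic minimum wins
-- (objective: alternative); B returns None instead of A's '' on the corner stated at D_.

-- Shared helpers (Python dict .get on an association list = first match; Python truthiness of str|None)
def pvLookup {α : Type} (d : List (String × α)) (k : String) : Option α :=
  match d with
  | [] => none
  | (k', v) :: t => if k' == k then some v else pvLookup t k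

def pvTruthy : Option String → Bool
  | none => false
  | some s => !(s == "")

def pvAddrOf (a : List (String × String)) : Option String := pvLookup a "addr"

def pvIsFloat (a : List (String × String)) : Bool :=
  pvLookup a "OS-EXT-IPS:type" == some "floating"

-- ===== PORT A =====
def pick_ssh_ip_py (srv : List (String × List (String × List (List (String × String))))) (prefer_fixed : Bool) : Option String :=
  -- floating = None; fixed = None; for _net, addrs in srv.get("addresses", {}).items(): for a in addrs: …
  let addresses := (pvLookup srv "addresses").getD []
  let st := addresses.foldl (fun (st : Option String × Option String) na =>
      na.2.foldl (fun (st : Option String × Option String) a =>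
        if pvIsFloat a then
          (if pvTruthy st.1 then st.1 else pvAddrOf a, st.2)     -- floating = floating or a.get("addr")
        else if pvTruthy st.2 then st
        else (st.1, pvAddrOf a)) st)                             -- elif not fixed: fixed = a.get("addr")
    (none, none)
  if prefer_fixed then (if pvTruthy st.2 then st.2 else st.1)    -- fixed or floating
  else (if pvTruthy st.1 then st.1 else st.2)                    -- floating or fixed

-- ===== PORT B =====
-- the flattened address entries Source B's counter i walks over
def pvEntries (srv : List (String × List (String × List (List (String × String))))) : List (List (String × String)) :=
  (((pvLookup srv "addresses").getD []).map Prod.snd).flatten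

-- rank = 0 if is_float != prefer_fixed else 1
def pvRank (prefer_fixed : Bool) (a : List (String × String)) : Int :=
  if pvIsFloat a != prefer_fixed then 0 else 1

-- the candidate list Source B builds: for each entry with a truthy addr, (rank, i, addr)
def pvCandsFrom (prefer_fixed : Bool) : Int → List (List (String × String)) → List (Int × Int × String)
  | _, [] => []
  | i, a :: t =>
    match pvAddrOf a with
    | some s => if s == "" then pvCandsFrom prefer_fixed (i+1) t
                else (pvRank prefer_fixed a, i, s) :: pvCandsFrom prefer_fixed (i+1) t
    | none => pvCandsFrom prefer_fixed (i+1) t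

-- Python's lexicographic < on (int, int, str) triples
def pvTupLt (x y : Int × Int × String) : Bool :=
  decide (x.1 < y.1) || (x.1 == y.1 && (decide (x.2.1 < y.2.1) || (x.2.1 == y.2.1 && decide (x.2.2 < y.2.2))))

def pick_ssh_ip_py_alt (srv : List (String × List (String × List (List (String × String))))) (prefer_fixed : Bool) : Option String :=
  let cands := pvCandsFrom prefer_fixed 0 (pvEntries srv)
  -- return min(cands)[2] if cands else None   (min keeps the first of equals; keys are distinct anyway)
  match cands with
  | [] => none
  | c :: t => some ((t.foldl (fun m d => if pvTupLt d m then d else m) c).2.2)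

-- ===== PRECONDITION & SPEC =====
-- When no address entry has a truthy 'addr' and the last entry of the category A's chosen
-- slot falls back to maps 'addr' to the empty string, A returns '' (leftover falsy loop
-- state) while B returns None, the intended value: '' is not an IP.
def D_pick_ssh_ip_py (srv : List (String × List (String × List (List (String × String))))) (prefer_fixed : Bool) : Prop :=
  let ents := ((PySem.Dict.mk srv).getD "addresses" []).flatMap Prod.snd
  (∀ a ∈ ents, (PySem.Dict.mk a).getD "addr" "" = "") ∧
  (ents.filter (fun a => ((PySem.Dict.mk a).get? "OS-EXT-IPS:type" == some "floating") == prefer_fixed)).getLast?.bind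
    (fun a => (PySem.Dict.mk a).get? "addr") = some ""

instance (srv : List (String × List (String × List (List (String × String))))) (prefer_fixed : Bool) : Decidable (D_pick_ssh_ip_py srv prefer_fixed) := by unfold D_pick_ssh_ip_py; infer_instance

def Spec_pick_ssh_ip_py (srv : List (String × List (String × List (List (String × String))))) (prefer_fixed : Bool) (out : Option String) : Prop := ¬ D_pick_ssh_ip_py srv prefer_fixed → out = pick_ssh_ip_py_alt srv prefer_fixed
instance (srv : List (String × List (String × List (List (String × String))))) (prefer_fixed : Bool) (out : Option String) : Decidable (Spec_pick_ssh_ip_py srv prefer_fixed out) := by unfold Spec_pick_ssh_ip_py; infer_instance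

def pvDiffWitness_pick_ssh_ip_py : (List (String × List (String × List (List (String × String))))) × Bool :=
  ([("addresses", [("net", [[("addr", "")]])])], false)
def pvDiffWitnessOut_pick_ssh_ip_py : (Option String) × (Option String) := (some "", none)

-- ===== CLAIM (what is proved, stated in full; the proofs are below) =====
def Claim_unchanged_pick_ssh_ip_py : Prop := ∀ (srv : List (String × List (String × List (List (String × String))))) (prefer_fixed : Bool), Dom_pick_ssh_ip_py srv prefer_fixed → Spec_pick_ssh_ip_py srv prefer_fixed (pick_ssh_ip_py srv prefer_fixed)
def Claim_changed_pick_ssh_ip_py : Prop := Dom_pick_ssh_ip_py (pvDiffWitness_pick_ssh_ip_py.1) (pvDiffWitness_pick_ssh_ip_py.2) ∧ D_pick_ssh_ip_py (pvDiffWitness_pick_ssh_ip_py.1) (pvDiffWitness_pick_ssh_ip_py.2) ∧ pick_ssh_ip_py (pvDiffWitness_pick_ssh_ip_py.1) (pvDiffWitness_pick_ssh_ip_py.2) = pvDiffWitnessOut_pick_ssh_ip_py.1 ∧ pick_ssh_ip_py_alt (pvDiffWitness_pick_ssh_ip_py.1) (pvDiffWitness_pick_ssh_ip_py.2) = pvDiffWitnessOut_pick_ssh_ip_py.2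 ∧ pvDiffWitnessOut_pick_ssh_ip_py.1 ≠ pvDiffWitnessOut_pick_ssh_ip_py.2
def Claim_exact_pick_ssh_ip_py : Prop := ∀ (srv : List (String × List (String × List (List (String × String))))) (prefer_fixed : Bool), Dom_pick_ssh_ip_py srv prefer_fixed → D_pick_ssh_ip_py srv prefer_fixed → pick_ssh_ip_py srv prefer_fixed ≠ pick_ssh_ip_py_alt srv prefer_fixed

-- ===== LEMMAS AND PROOFS =====

lemma pvLookup_dict {α : Type} (d : List (String × α)) (k : String) :
    pvLookup d k = (PySem.Dict.mk d).get? k := by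
  induction d with
  | nil => rfl
  | cons p t ih =>
      rw [pvLookup, PySem.Dict.get?_mk_cons]
      by_cases h : (p.1 == k) = true
      · simp [h]
      · simp only [Bool.not_eq_true] at h
        simp [h, ih]

lemma pvFalsy_iff (o : Option String) : (o.getD "" = "") ↔ pvTruthy o = false := by
  cases o with
  | none => simp [pvTruthy]
  | some s => simp [pvTruthy]

lemma pvD_eq (srv : List (String × List (String × List (List (String × String))))) (prefer_fixed : Bool) :
    D_pick_ssh_ip_py srv prefer_fixed ↔
    ((∀ a ∈ pvEntries srv, pvTruthy (pvAddrOf a) = false) ∧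
     ((pvEntries srv).filter (fun a => if prefer_fixed then pvIsFloat a else !pvIsFloat a)).getLast?.bind pvAddrOf = some "") := by
  have he : ((PySem.Dict.mk srv).getD "addresses" []).flatMap Prod.snd = pvEntries srv := by
    rw [pvEntries, pvLookup_dict, PySem.Dict.getD_eq_get?_getD]
    cases (PySem.Dict.mk srv).get? "addresses" <;> simp [List.flatMap_def]
  have hget : ∀ (a : List (String × String)) (k : String),
      (PySem.Dict.mk a).get? k = pvLookup a k := fun a k => (pvLookup_dict a k).symm
  have hgetD : ∀ a : List (String × String),
      ((PySem.Dict.mk a).getD "addr" "" = "") ↔ pvTruthy (pvAddrOf a) = false := by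
    intro a
    rw [PySem.Dict.getD_eq_get?_getD, hget, ← pvAddrOf]
    exact pvFalsy_iff _
  unfold D_pick_ssh_ip_py
  simp only [he, hget, pvAddrOf, pvIsFloat, hgetD]
  cases prefer_fixed <;> simp

-- the preferred-first-match query, over an arbitrary type predicate p
def pvQ (p : List (String × String) → Bool) (a : List (String × String)) : Option String :=
  if p a && pvTruthy (pvAddrOf a) then pvAddrOf a else none

-- first truthy addr regardless of type
def pvQT (a : List (String × String)) : Option String :=
  if pvTruthy (pvAddrOf a) then pvAddrOf a else none

-- one component of A's accumulating loop, over an arbitrary type predicate p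
def pvScan (p : List (String × String) → Bool) (fl : Option String) (es : List (List (String × String))) : Option String :=
  es.foldl (fun fl a => if p a then (if pvTruthy fl then fl else pvAddrOf a) else fl) fl

lemma pvScan_truthy (p : List (String × String) → Bool) (es : List (List (String × String))) :
    ∀ fl, pvTruthy fl = true → pvScan p fl es = fl := by
  induction es with
  | nil => intro fl _; rfl
  | cons a t ih =>
      intro fl h
      simp only [pvScan, List.foldl_cons, h]
      by_cases hp : p a = true <;> simp [hp] <;> exact ih fl h

lemma pvScan_found (p : List (String × String) → Bool) (es : List (List (String × String))) :
    ∀ fl v, pvTruthy fl = false → es.findSome? (pvQ p) = some v → pvScan p fl es = some v := by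
  induction es with
  | nil => intro fl v _ h; simp [List.findSome?] at h
  | cons a t ih =>
      intro fl v hfl h
      rw [List.findSome?_cons] at h
      simp only [pvScan, List.foldl_cons, hfl]
      by_cases hp : p a = true
      · by_cases ht : pvTruthy (pvAddrOf a) = true
        · have hq : pvQ p a = pvAddrOf a := by simp [pvQ, hp, ht]
          rw [hq] at h
          cases hqa : pvAddrOf a with
          | none => rw [hqa] at ht; simp [pvTruthy] at ht
          | some s =>
              rw [hqa] at h
              simp only at h
              cases h
              simp only [hp, if_true, Bool.false_eq_true, if_false]
              exact pvScan_truthy p t _ (by rw [← hqa]; exact ht)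
        · have hq : pvQ p a = none := by simp [pvQ, ht]
          rw [hq] at h
          simp only at h
          simp only [Bool.not_eq_true] at ht
          simp only [hp, if_true, Bool.false_eq_true, if_false]
          exact ih _ v ht h
      · simp only [Bool.not_eq_true] at hp
        have hq : pvQ p a = none := by simp [pvQ, hp]
        rw [hq] at h
        simp only at h
        simp only [hp, Bool.false_eq_true, if_false]
        exact ih fl v hfl h

lemma pvQ_found_truthy (p : List (String × String) → Bool) (es : List (List (String × String)))
    (v : String) (h : es.findSome? (pvQ p) = some v) : pvTruthy (some v) = true := by
  obtain ⟨a, _, ha⟩ := List.exists_of_findSome?_eq_some h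
  simp only [pvQ] at ha
  by_cases hc : (p a && pvTruthy (pvAddrOf a)) = true
  · rw [if_pos hc] at ha
    obtain ⟨_, ht⟩ := Bool.and_eq_true_iff.mp hc
    rw [ha] at ht; exact ht
  · rw [if_neg hc] at ha; cases ha

lemma pvScan_notfound (p : List (String × String) → Bool) (es : List (List (String × String))) :
    ∀ fl, pvTruthy fl = false → es.findSome? (pvQ p) = none →
      pvScan p fl es = (match (es.filter p).getLast? with | none => fl | some a => pvAddrOf a) := by
  induction es with
  | nil => intro fl _ _; rfl
  | cons a t ih =>
      intro fl hfl h
      rw [List.findSome?_cons] at h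
      by_cases hp : p a = true
      · have hq : pvQ p a = none := by
          cases hq : pvQ p a with
          | none => rfl
          | some v => rw [hq] at h; simp at h
        rw [hq] at h; simp only at h
        have ht : pvTruthy (pvAddrOf a) = false := by
          by_contra hc
          simp only [Bool.not_eq_false] at hc
          simp only [pvQ, hp, hc, Bool.and_self, if_true] at hq
          cases hq' : pvAddrOf a with
          | none => simp [pvTruthy, hq'] at hc
          | some s => rw [hq'] at hq; cases hq
        simp only [pvScan, List.foldl_cons, hfl, hp, if_true, Bool.false_eq_true, if_false]
        have := ih (pvAddrOf a) ht h
        simp only [pvScan] at this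
        rw [this]
        rw [List.filter_cons_of_pos hp]
        cases hft : t.filter p with
        | nil => simp
        | cons c u =>
            rw [List.getLast?_cons_cons]
            cases hl : (c :: u).getLast? with
            | none => simp [List.getLast?_eq_none_iff] at hl
            | some d => rfl
      · simp only [Bool.not_eq_true] at hp
        have hq : pvQ p a = none := by simp [pvQ, hp]
        rw [hq] at h; simp only at h
        simp only [pvScan, List.foldl_cons, hp, Bool.false_eq_true, if_false]
        rw [List.filter_cons_of_neg (by simp [hp])]
        exact ih fl hfl h

lemma pvScan_notfound_falsy (p : List (String × String) → Bool) (es : List (List (String × String)))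
    (h : es.findSome? (pvQ p) = none) : pvTruthy (pvScan p none es) = false := by
  rw [pvScan_notfound p es none rfl h]
  cases hlt : (es.filter p).getLast? with
  | none => rfl
  | some a =>
      have ha : a ∈ es.filter p := List.mem_of_getLast? hlt
      have hmem : a ∈ es := List.mem_of_mem_filter ha
      have hpa : p a = true := List.of_mem_filter ha
      have := List.findSome?_eq_none_iff.mp h a hmem
      simp only [pvQ, hpa, Bool.true_and] at this
      by_contra hc
      simp only [Bool.not_eq_false] at hc
      rw [if_pos hc] at this
      cases hq : pvAddrOf a with
      | none => simp [pvTruthy, hq] at hc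
      | some s => rw [hq] at this; cases this

-- A's nested loop over addresses = the component scans over the flattened entries
lemma pvFoldA_decomp (es : List (List (String × String))) :
    ∀ fl fx : Option String,
      es.foldl (fun (st : Option String × Option String) a =>
        if pvIsFloat a then
          (if pvTruthy st.1 then st.1 else pvAddrOf a, st.2)
        else if pvTruthy st.2 then st
        else (st.1, pvAddrOf a)) (fl, fx)
      = (pvScan pvIsFloat fl es, pvScan (fun a => !pvIsFloat a) fx es) := by
  induction es with
  | nil => intro fl fx; rfl
  | cons a t ih =>
      intro fl fx
      simp only [List.foldl_cons, pvScan, List.foldl_cons]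
      by_cases hp : pvIsFloat a = true
      · simp only [hp, if_true, Bool.not_true, Bool.false_eq_true, if_false]
        exact ih _ fx
      · simp only [Bool.not_eq_true] at hp
        simp only [hp, Bool.false_eq_true, if_false, Bool.not_false, if_true]
        by_cases ht : pvTruthy fx = true
        · simp only [ht, if_true]
          exact ih fl fx
        · simp only [Bool.not_eq_true] at ht
          simp only [ht, Bool.false_eq_true, if_false]
          exact ih fl _

lemma pvPickA_eq (srv : List (String × List (String × List (List (String × String))))) (prefer_fixed : Bool) :
    pick_ssh_ip_py srv prefer_fixed =
      (let flA := pvScan pvIsFloat none (pvEntries srv)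
       let fxA := pvScan (fun a => !pvIsFloat a) none (pvEntries srv)
       if prefer_fixed then (if pvTruthy fxA then fxA else flA)
       else (if pvTruthy flA then flA else fxA)) := by
  simp only [pick_ssh_ip_py, pvEntries]
  rw [← List.foldl_map (f := Prod.snd), ← List.foldl_flatten, pvFoldA_decomp]

lemma pvAllFalsy_q_none (p : List (String × String) → Bool) (es : List (List (String × String)))
    (h : ∀ a ∈ es, pvTruthy (pvAddrOf a) = false) : es.findSome? (pvQ p) = none := by
  apply List.findSome?_eq_none_iff.mpr
  intro a ha
  simp [pvQ, h a ha]

lemma pvFalsy_last (es : List (List (String × String)))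
    (h : ∀ a ∈ es, pvTruthy (pvAddrOf a) = false)
    (p : List (String × String) → Bool)
    (hne : (es.filter p).getLast?.bind pvAddrOf ≠ some "") :
    (match (es.filter p).getLast? with | none => (none : Option String) | some a => pvAddrOf a) = none := by
  cases hlt : (es.filter p).getLast? with
  | none => rfl
  | some a =>
      rw [hlt] at hne
      simp only [Option.bind_some] at hne
      have hmem : a ∈ es := List.mem_of_mem_filter (List.mem_of_getLast? hlt)
      have hf := h a hmem
      cases hq : pvAddrOf a with
      | none => exact hq
      | some s =>
          rw [hq] at hf hne
          have hs : s = "" := by simpa [pvTruthy] using hf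
          exact absurd (by rw [hs]) hne

-- ===== B-side lemmas =====

lemma pvCands_bounds (pf : Bool) (es : List (List (String × String))) :
    ∀ i, ∀ d ∈ pvCandsFrom pf i es, (d.1 = 0 ∨ d.1 = 1) ∧ i ≤ d.2.1 := by
  induction es with
  | nil => intro i d hd; simp [pvCandsFrom] at hd
  | cons a t ih =>
      intro i d hd
      simp only [pvCandsFrom] at hd
      have step : d ∈ pvCandsFrom pf (i+1) t → (d.1 = 0 ∨ d.1 = 1) ∧ i ≤ d.2.1 := by
        intro h
        obtain ⟨h1, h2⟩ := ih (i+1) d h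
        exact ⟨h1, by omega⟩
      cases hq : pvAddrOf a with
      | none => rw [hq] at hd; exact step hd
      | some s =>
          rw [hq] at hd
          simp only at hd
          by_cases hs : (s == "") = true
          · rw [if_pos hs] at hd; exact step hd
          · rw [if_neg hs] at hd
            rcases List.mem_cons.mp hd with h | h
            · subst h
              refine ⟨?_, le_refl _⟩
              unfold pvRank
              by_cases hb : (pvIsFloat a != pf) = true <;> simp [hb]
            · exact step h

lemma pvCands_pairwise (pf : Bool) (es : List (List (String × String))) :
    ∀ i, (pvCandsFrom pf i es).Pairwise (fun x y => x.2.1 < y.2.1) := by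
  induction es with
  | nil => intro i; simp [pvCandsFrom]
  | cons a t ih =>
      intro i
      simp only [pvCandsFrom]
      cases hq : pvAddrOf a with
      | none => exact ih (i+1)
      | some s =>
          simp only
          by_cases hs : (s == "") = true
          · rw [if_pos hs]; exact ih (i+1)
          · rw [if_neg hs]
            refine List.Pairwise.cons ?_ (ih (i+1))
            intro d hd
            have := (pvCands_bounds pf t (i+1) d hd).2
            simpa using by omega

lemma pvTupLt_false (c d : Int × Int × String) (h1 : c.1 ≤ d.1) (h2 : c.2.1 < d.2.1) :
    pvTupLt d c = false := by
  unfold pvTupLt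
  have e1 : decide (d.1 < c.1) = false := by simp; omega
  have e3 : decide (d.2.1 < c.2.1) = false := by simp; omega
  rcases lt_or_eq_of_le h1 with h | h
  · have e2 : (d.1 == c.1) = false := by simp only [beq_eq_false_iff_ne, ne_eq]; omega
    simp [e1, e2]
  · have e4 : (d.2.1 == c.2.1) = false := by simp only [beq_eq_false_iff_ne, ne_eq]; omega
    simp [e1, e3, e4]

-- the lexicographic min over a rank-0/1, index-increasing candidate list is the first
-- rank-0 candidate, else the first candidate
lemma pvMinCands (t : List (Int × Int × String)) :
    ∀ c, (∀ d ∈ c :: t, d.1 = 0 ∨ d.1 = 1) → (c :: t).Pairwise (fun x y => x.2.1 < y.2.1) →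
      t.foldl (fun m d => if pvTupLt d m then d else m) c
        = ((c :: t).find? (fun d => d.1 == 0)).getD c := by
  induction t with
  | nil =>
      intro c hr _
      rcases hr c (by simp) with h0 | h1
      · simp [List.find?, h0]
      · simp [List.find?, h1]
  | cons d t' ih =>
      intro c hr hp
      have hcd : c.2.1 < d.2.1 := (List.pairwise_cons.mp hp).1 d (by simp)
      have hpt : (d :: t').Pairwise (fun x y => x.2.1 < y.2.1) := (List.pairwise_cons.mp hp).2
      have hpc : (c :: t').Pairwise (fun x y => x.2.1 < y.2.1) := by
        refine List.pairwise_cons.mpr ⟨?_, (List.pairwise_cons.mp hpt).2⟩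
        intro e he
        exact lt_trans hcd ((List.pairwise_cons.mp hpt).1 e he)
      have hrc : ∀ e ∈ c :: t', e.1 = 0 ∨ e.1 = 1 := by
        intro e he
        rcases List.mem_cons.mp he with h | h
        · subst h; exact hr e (by simp)
        · exact hr e (by simp [h])
      have hrd : ∀ e ∈ d :: t', e.1 = 0 ∨ e.1 = 1 := by
        intro e he
        exact hr e (List.mem_cons_of_mem c he)
      rcases hr c (by simp) with hc0 | hc1
      · -- c has rank 0: it stays the minimum
        have hlt : pvTupLt d c = false := by
          apply pvTupLt_false
          · rcases hr d (by simp) with h | h <;> omega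
          · exact hcd
        simp only [List.foldl_cons, hlt, Bool.false_eq_true, if_false]
        rw [ih c hrc hpc]
        have hfc : (c :: t').find? (fun e => e.1 == 0) = some c := by
          simp [List.find?, hc0]
        have hfc2 : (c :: d :: t').find? (fun e => e.1 == 0) = some c := by
          simp [List.find?, hc0]
        rw [hfc, hfc2]
      · -- c has rank 1
        rcases hr d (by simp) with hd0 | hd1
        · -- d has rank 0: it takes over
          have hlt : pvTupLt d c = true := by
            simp [pvTupLt, hd0, hc1]
          simp only [List.foldl_cons, hlt, if_true]
          rw [ih d hrd hpt]
          have h1 : (c :: d :: t').find? (fun e => e.1 == 0) = some d := by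
            simp [List.find?, hc1, hd0]
          have h2 : (d :: t').find? (fun e => e.1 == 0) = some d := by
            simp [List.find?, hd0]
          rw [h1, h2]
          simp
        · -- both rank 1: keep c
          have hlt : pvTupLt d c = false := by
            apply pvTupLt_false
            · omega
            · exact hcd
          simp only [List.foldl_cons, hlt, Bool.false_eq_true, if_false]
          rw [ih c hrc hpc]
          have h1 : (c :: d :: t').find? (fun e => e.1 == 0) =
              (t').find? (fun e => e.1 == 0) := by
            simp [List.find?, hc1, hd1]
          have h2 : (c :: t').find? (fun e => e.1 == 0) =
              (t').find? (fun e => e.1 == 0) := by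
            simp [List.find?, hc1]
          rw [h1, h2]

-- the first rank-0 candidate's addr = the first preferred truthy addr
lemma pvCands_find0 (pf : Bool) (es : List (List (String × String))) :
    ∀ i, ((pvCandsFrom pf i es).find? (fun d => d.1 == 0)).map (fun d => d.2.2)
      = es.findSome? (pvQ (fun a => pvIsFloat a != pf)) := by
  induction es with
  | nil => intro i; simp [pvCandsFrom, List.findSome?]
  | cons a t ih =>
      intro i
      rw [List.findSome?_cons]
      simp only [pvCandsFrom]
      cases hq : pvAddrOf a with
      | none =>
          have : pvQ (fun a => pvIsFloat a != pf) a = none := by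
            simp [pvQ, hq, pvTruthy]
          rw [this]; exact ih (i+1)
      | some s =>
          simp only
          by_cases hs : (s == "") = true
          · rw [if_pos hs]
            have : pvQ (fun a => pvIsFloat a != pf) a = none := by
              simp only [pvQ, hq, pvTruthy, hs]
              simp
            rw [this]; exact ih (i+1)
          · rw [if_neg hs]
            by_cases hpref : (pvIsFloat a != pf) = true
            · have hr0 : pvRank pf a = 0 := by simp [pvRank, hpref]
              have : pvQ (fun a => pvIsFloat a != pf) a = some s := by
                simp only [pvQ, hq, pvTruthy, hpref, Bool.true_and]
                simp [hs]
              rw [this]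
              simp [List.find?, hr0]
            · have hr1 : pvRank pf a = 1 := by
                simp only [Bool.not_eq_true] at hpref; simp [pvRank, hpref]
              have : pvQ (fun a => pvIsFloat a != pf) a = none := by
                simp only [Bool.not_eq_true] at hpref
                simp [pvQ, hpref]
              rw [this]
              simp only [List.find?, hr1]
              exact ih (i+1)

-- the first candidate's addr = the first truthy addr
lemma pvCands_head (pf : Bool) (es : List (List (String × String))) :
    ∀ i, ((pvCandsFrom pf i es).head?).map (fun d => d.2.2) = es.findSome? pvQT := by
  induction es with
  | nil => intro i; simp [pvCandsFrom, List.findSome?]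
  | cons a t ih =>
      intro i
      rw [List.findSome?_cons]
      simp only [pvCandsFrom]
      cases hq : pvAddrOf a with
      | none =>
          have : pvQT a = none := by simp [pvQT, hq, pvTruthy]
          rw [this]; exact ih (i+1)
      | some s =>
          simp only
          by_cases hs : (s == "") = true
          · rw [if_pos hs]
            have : pvQT a = none := by
              simp only [pvQT, hq, pvTruthy, hs]; simp
            rw [this]; exact ih (i+1)
          · rw [if_neg hs]
            have : pvQT a = some s := by
              simp only [pvQT, hq, pvTruthy]
              simp [hs]
            rw [this]
            simp

-- with no truthy preferred entry, the first truthy addr is the first truthy other-type addr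
lemma pvQT_of_no_pref (p : List (String × String) → Bool) (es : List (List (String × String))) :
    es.findSome? (pvQ p) = none → es.findSome? pvQT = es.findSome? (pvQ (fun a => !p a)) := by
  induction es with
  | nil => intro _; rfl
  | cons a t ih =>
      intro h
      rw [List.findSome?_cons] at h
      rw [List.findSome?_cons, List.findSome?_cons]
      have hq : pvQ p a = none := by
        cases hq : pvQ p a with
        | none => rfl
        | some v => rw [hq] at h; simp at h
      rw [hq] at h; simp only at h
      by_cases ht : pvTruthy (pvAddrOf a) = true
      · have hp : p a = false := by
          by_contra hc
          simp only [Bool.not_eq_false] at hc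
          simp only [pvQ, hc, ht, Bool.and_self, if_true] at hq
          cases hqa : pvAddrOf a with
          | none => simp [pvTruthy, hqa] at ht
          | some s => rw [hqa] at hq; cases hq
        have h1 : pvQT a = pvAddrOf a := by simp [pvQT, ht]
        have h2 : pvQ (fun a => !p a) a = pvAddrOf a := by simp [pvQ, hp, ht]
        rw [h1, h2]
        cases hqa : pvAddrOf a with
        | none => simp [pvTruthy, hqa] at ht
        | some s => simp
      · simp only [Bool.not_eq_true] at ht
        have h1 : pvQT a = none := by simp [pvQT, ht]
        have h2 : pvQ (fun a => !p a) a = none := by simp [pvQ, ht]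
        rw [h1, h2]
        simp only
        exact ih h

-- if every addr is falsy the candidate list is empty
lemma pvCands_falsy (pf : Bool) (es : List (List (String × String)))
    (h : ∀ a ∈ es, pvTruthy (pvAddrOf a) = false) : ∀ i, pvCandsFrom pf i es = [] := by
  induction es with
  | nil => intro i; rfl
  | cons a t ih =>
      intro i
      have ha := h a (by simp)
      simp only [pvCandsFrom]
      cases hq : pvAddrOf a with
      | none => exact ih (fun b hb => h b (by simp [hb])) (i+1)
      | some s =>
          rw [hq] at ha
          have hs : (s == "") = true := by simpa [pvTruthy] using ha
          simp only
          rw [if_pos hs]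
          exact ih (fun b hb => h b (by simp [hb])) (i+1)

-- B's value characterised: first preferred truthy addr, else first truthy addr
lemma pvAlt_eq (srv : List (String × List (String × List (List (String × String))))) (pf : Bool) :
    pick_ssh_ip_py_alt srv pf =
      (match (pvEntries srv).findSome? (pvQ (fun a => pvIsFloat a != pf)) with
       | some v => some v
       | none => (pvEntries srv).findSome? pvQT) := by
  unfold pick_ssh_ip_py_alt
  simp only []
  cases hc : pvCandsFrom pf 0 (pvEntries srv) with
  | nil =>
      have hf := pvCands_find0 pf (pvEntries srv) 0
      rw [hc] at hf
      simp only [List.find?, Option.map_none] at hf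
      have hh := pvCands_head pf (pvEntries srv) 0
      rw [hc] at hh
      simp only [List.head?, Option.map_none] at hh
      rw [← hf, ← hh]
  | cons c t =>
      have hr : ∀ d ∈ c :: t, d.1 = 0 ∨ d.1 = 1 := by
        intro d hd
        exact (pvCands_bounds pf (pvEntries srv) 0 d (by rw [hc]; exact hd)).1
      have hp : (c :: t).Pairwise (fun x y => x.2.1 < y.2.1) := by
        have := pvCands_pairwise pf (pvEntries srv) 0
        rwa [hc] at this
      simp only
      rw [pvMinCands t c hr hp]
      have hf := pvCands_find0 pf (pvEntries srv) 0
      rw [hc] at hf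
      have hh := pvCands_head pf (pvEntries srv) 0
      rw [hc] at hh
      simp only [List.head?, Option.map_some] at hh
      cases hfind : (c :: t).find? (fun d => d.1 == 0) with
      | some d =>
          rw [hfind] at hf
          simp only [Option.map_some] at hf
          rw [← hf]
          simp
      | none =>
          rw [hfind] at hf
          simp only [Option.map_none] at hf
          rw [← hf, ← hh]
          simp

theorem pvMain (srv : List (String × List (String × List (List (String × String))))) (prefer_fixed : Bool)
    (hnD : ¬ ((∀ a ∈ pvEntries srv, pvTruthy (pvAddrOf a) = false) ∧
      ((pvEntries srv).filter (fun a => if prefer_fixed then pvIsFloat a else !pvIsFloat a)).getLast?.bind pvAddrOf = some "")) :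
    pick_ssh_ip_py srv prefer_fixed = pick_ssh_ip_py_alt srv prefer_fixed := by
  rw [pvPickA_eq, pvAlt_eq]
  simp only []
  set es := pvEntries srv with hes
  have hall : es.findSome? (pvQ pvIsFloat) = none → es.findSome? (pvQ (fun a => !pvIsFloat a)) = none
      → ∀ a ∈ es, pvTruthy (pvAddrOf a) = false := by
    intro h1 h2 a ha
    by_cases hp : pvIsFloat a = true
    · have := List.findSome?_eq_none_iff.mp h1 a ha
      simp only [pvQ, hp, Bool.true_and] at this
      by_contra hc
      simp only [Bool.not_eq_false] at hc
      rw [if_pos hc] at this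
      cases hq : pvAddrOf a with
      | none => simp [pvTruthy, hq] at hc
      | some s => rw [hq] at this; cases this
    · simp only [Bool.not_eq_true] at hp
      have := List.findSome?_eq_none_iff.mp h2 a ha
      simp only [pvQ, hp, Bool.not_false, Bool.true_and] at this
      by_contra hc
      simp only [Bool.not_eq_false] at hc
      rw [if_pos hc] at this
      cases hq : pvAddrOf a with
      | none => simp [pvTruthy, hq] at hc
      | some s => rw [hq] at this; cases this
  cases prefer_fixed with
  | false =>
      have hpfun : pvQ (fun a => pvIsFloat a != false) = pvQ pvIsFloat := by
        funext a; simp [pvQ]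
      rw [hpfun]
      simp only [Bool.false_eq_true, if_false]
      cases hF : es.findSome? (pvQ pvIsFloat) with
      | some v =>
          rw [pvScan_found pvIsFloat es none v rfl hF, pvQ_found_truthy pvIsFloat es v hF]
          simp
      | none =>
          rw [pvScan_notfound_falsy pvIsFloat es hF]
          simp only [Bool.false_eq_true, if_false]
          rw [pvQT_of_no_pref pvIsFloat es hF]
          cases hX : es.findSome? (pvQ (fun a => !pvIsFloat a)) with
          | some w =>
              rw [pvScan_found _ es none w rfl hX]
          | none =>
              have hfalsy := hall hF hX
              have hne : (es.filter (fun a => !pvIsFloat a)).getLast?.bind pvAddrOf ≠ some "" := by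
                intro hc
                exact hnD ⟨hfalsy, by simpa using hc⟩
              rw [pvScan_notfound _ es none rfl hX, pvFalsy_last es hfalsy _ hne]
  | true =>
      have hpfun : pvQ (fun a => pvIsFloat a != true) = pvQ (fun a => !pvIsFloat a) := by
        funext a; simp [pvQ]
      rw [hpfun]
      simp only [if_true]
      cases hX : es.findSome? (pvQ (fun a => !pvIsFloat a)) with
      | some w =>
          rw [pvScan_found _ es none w rfl hX, pvQ_found_truthy _ es w hX]
          simp
      | none =>
          rw [pvScan_notfound_falsy _ es hX]
          simp only [Bool.false_eq_true, if_false]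
          rw [pvQT_of_no_pref (fun a => !pvIsFloat a) es hX]
          have hnn : es.findSome? (pvQ (fun a => !!pvIsFloat a)) = es.findSome? (pvQ pvIsFloat) := by
            have : pvQ (fun a => !!pvIsFloat a) = pvQ pvIsFloat := by
              funext a; simp [pvQ]
            rw [this]
          rw [hnn]
          cases hF : es.findSome? (pvQ pvIsFloat) with
          | some v =>
              rw [pvScan_found pvIsFloat es none v rfl hF]
          | none =>
              have hfalsy := hall hF hX
              have hne : (es.filter (fun a => pvIsFloat a)).getLast?.bind pvAddrOf ≠ some "" := by
                intro hc
                exact hnD ⟨hfalsy, by simpa using hc⟩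
              rw [pvScan_notfound pvIsFloat es none rfl hF]
              have := pvFalsy_last es hfalsy (fun a => pvIsFloat a) hne
              rw [this]

-- ===== VERDICT (by name: the statement is the Claim_ definition above) =====
theorem pick_ssh_ip_py_spec : Claim_unchanged_pick_ssh_ip_py := by
  intro srv prefer_fixed _ hnD
  exact pvMain srv prefer_fixed (fun hc => hnD ((pvD_eq srv prefer_fixed).mpr hc))

theorem pick_ssh_ip_py_changed : Claim_changed_pick_ssh_ip_py := by
  unfold Claim_changed_pick_ssh_ip_py; decide

theorem pick_ssh_ip_py_tight : Claim_exact_pick_ssh_ip_py := by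
  intro srv prefer_fixed _ hD
  obtain ⟨hfalsy, hlast⟩ := (pvD_eq srv prefer_fixed).mp hD
  have halt : pick_ssh_ip_py_alt srv prefer_fixed = none := by
    unfold pick_ssh_ip_py_alt
    simp only []
    rw [pvCands_falsy prefer_fixed (pvEntries srv) hfalsy 0]
  rw [pvPickA_eq, halt]
  simp only []
  set es := pvEntries srv with hes
  have hF : es.findSome? (pvQ pvIsFloat) = none := pvAllFalsy_q_none pvIsFloat es hfalsy
  have hX : es.findSome? (pvQ (fun a => !pvIsFloat a)) = none := pvAllFalsy_q_none _ es hfalsy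
  have hsome : ∀ p : List (String × String) → Bool,
      (es.filter p).getLast?.bind pvAddrOf = some "" →
      (match (es.filter p).getLast? with | none => (none : Option String) | some a => pvAddrOf a) = some "" := by
    intro p hp
    cases hlt : (es.filter p).getLast? with
    | none => rw [hlt] at hp; cases hp
    | some a => rw [hlt] at hp; simpa using hp
  cases prefer_fixed with
  | false =>
      simp only [Bool.false_eq_true, if_false]
      rw [pvScan_notfound_falsy pvIsFloat es hF]
      simp only [Bool.false_eq_true, if_false]
      rw [pvScan_notfound _ es none rfl hX, hsome _ (by simpa using hlast)]
      simp
  | true =>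
      simp only [if_true]
      rw [pvScan_notfound_falsy _ es hX]
      simp only [Bool.false_eq_true, if_false]
      rw [pvScan_notfound pvIsFloat es none rfl hF]
      have := hsome (fun a => pvIsFloat a) (by simpa using hlast)
      rw [this]
      simp
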